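-- pv_equiv track=rewrite | github.com/mubashir20023/greenmind-ai | app/facts.py | _compress_indices_to_ranges
-- ===== SOURCE A (Python) =====
-- _MONTHS = [
--     ("january","Jan"),("february","Feb"),("march","Mar"),("april","Apr"),
--     ("may","May"),("june","Jun"),("july","Jul"),("august","Aug"),
--     ("september","Sep"),("october","Oct"),("november","Nov"),("december","Dec"),
-- ]
--
-- def _compress_indices_to_ranges(idxs: list[int]) -> str:
--     if not idxs: return ""
--     idxs = sorted(set(idxs))
--     ranges = []
--     start = prev = idxs[0]
--     for i in idxs[1:]:
--         if i == prev + 1: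
--             prev = i; continue
--         ranges.append((start, prev)); start = prev = i
--     ranges.append((start, prev))
--     parts = [(_MONTHS[a][1] if a == b else f"{_MONTHS[a][1]}–{_MONTHS[b][1]}") for a, b in ranges]
--     return ", ".join(parts)
-- ===== SOURCE B (Python) =====
-- _MONTHS = [
--     ("january","Jan"),("february","Feb"),("march","Mar"),("april","Apr"),
--     ("may","May"),("june","Jun"),("july","Jul"),("august","Aug"),
--     ("september","Sep"),("october","Oct"),("november","Nov"),("december","Dec"),
-- ]
--
-- def _compress_indices_to_ranges(idxs: list[int]) -> str:
--     # set-membership run detection: an index a starts a run iff a-1 is absent from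
--     # the set; each run is then extended by probing the set for successors.
--     s = set(idxs)
--     parts = []
--     for a in sorted(x for x in s if x - 1 not in s):
--         b = a
--         while b + 1 in s:
--             b += 1
--         parts.append(_MONTHS[a][1] if a == b else f"{_MONTHS[a][1]}\u2013{_MONTHS[b][1]}")
--     return ", ".join(parts)
-- ===== Notes on version B (the rewrite author's own statement) =====
-- stated objective: alternative
-- what changed: Replaces A's sort-then-linear-scan state machine by set-membership run detection: build a set, pick out the run starts (elements whose predecessor is absent), sort only those, and extend each run by probing the set for successors.
import Mathlib
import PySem

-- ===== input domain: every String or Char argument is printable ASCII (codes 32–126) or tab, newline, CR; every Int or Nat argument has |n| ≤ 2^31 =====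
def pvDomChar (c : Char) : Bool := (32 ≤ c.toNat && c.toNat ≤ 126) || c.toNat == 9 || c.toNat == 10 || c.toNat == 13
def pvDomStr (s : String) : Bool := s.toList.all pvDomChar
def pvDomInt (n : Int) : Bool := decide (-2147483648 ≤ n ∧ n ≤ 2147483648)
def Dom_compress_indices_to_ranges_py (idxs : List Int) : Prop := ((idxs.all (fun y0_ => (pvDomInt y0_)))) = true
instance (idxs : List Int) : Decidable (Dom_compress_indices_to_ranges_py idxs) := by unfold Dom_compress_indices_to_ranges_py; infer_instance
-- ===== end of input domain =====

-- B replaces A's sort-then-linear-scan state machine by set-membership run detection: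
-- sort only the run starts (elements whose predecessor is absent from the set) and extend
-- each run by probing the set for successors; same cost, a different algorithm.

-- ===== PORT A =====
def MONTHS : List (String × String) :=
  [("january","Jan"),("february","Feb"),("march","Mar"),("april","Apr"),
   ("may","May"),("june","Jun"),("july","Jul"),("august","Aug"),
   ("september","Sep"),("october","Oct"),("november","Nov"),("december","Dec")]

-- _MONTHS[a][1]; Python raises IndexError for a outside [-12, 11] (excluded by Pre_), default never read there
def monthAbbr (a : Int) : String := ((PySem.List.pyGet? MONTHS a).getD ("", "")).2

-- the body '(_MONTHS[a][1] if a == b else f"{_MONTHS[a][1]}–{_MONTHS[b][1]}")', identical in A and B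
def rangePart (ab : Int × Int) : String :=
  if ab.1 = ab.2 then monthAbbr ab.1 else monthAbbr ab.1 ++ "–" ++ monthAbbr ab.2

def compress_indices_to_ranges_py (idxs : List Int) : String :=
  if idxs = [] then ""
  else
    match PySem.List.sorted (PySem.Set.ofList idxs) (fun x => x) false with
    | [] => ""  -- unreachable: sorted(set(idxs)) of a nonempty list is nonempty
    | x :: rest =>
      -- start = prev = idxs[0]; for i in idxs[1:]: …
      let acc := rest.foldl
        (fun (st : List (Int × Int) × Int × Int) i =>
          if i = st.2.2 + 1 then (st.1, st.2.1, i)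
          else (st.1 ++ [(st.2.1, st.2.2)], i, i))
        ([], x, x)
      let ranges := acc.1 ++ [(acc.2.1, acc.2.2)]
      PySem.Str.join ", " (ranges.map rangePart)

-- ===== PORT B =====
-- 'b = a; while b + 1 in s: b += 1' — fuel s.length is a totality guard only: the loop
-- visits distinct elements of s, so it runs at most s.length times; the port is exact.
def extendRun (s : List Int) (b : Int) : Nat → Int
  | 0 => b
  | n + 1 => if (b + 1) ∈ s then extendRun s (b + 1) n else b

def compress_indices_to_ranges_py_alt (idxs : List Int) : String :=
  let s : PySem.Set Int := PySem.Set.ofList idxs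
  let starts := PySem.List.sorted (s.filter (fun x => decide ((x - 1) ∉ s))) (fun x => x) false
  PySem.Str.join ", "
    (starts.map (fun a => rangePart (a, extendRun s a s.length)))

-- ===== PRECONDITION & SPEC =====
-- Pre_ excludes exactly the inputs on which A raises IndexError: some element outside [-12, 11]
-- (Python's _MONTHS[a] accepts -12 ≤ a ≤ 11, wrapping negatives).
def Pre_compress_indices_to_ranges_py (idxs : List Int) : Prop := ∀ x ∈ idxs, -12 ≤ x ∧ x ≤ 11
instance (idxs : List Int) : Decidable (Pre_compress_indices_to_ranges_py idxs) := by
  unfold Pre_compress_indices_to_ranges_py; infer_instance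

def pvWitness_compress_indices_to_ranges_py : List Int := [0, 1, 2, 5, -1]

def Spec_compress_indices_to_ranges_py (idxs : List Int) (out : String) : Prop := out = compress_indices_to_ranges_py_alt idxs
instance (idxs : List Int) (out : String) : Decidable (Spec_compress_indices_to_ranges_py idxs out) := by unfold Spec_compress_indices_to_ranges_py; infer_instance

-- ===== CLAIM (what is proved, stated in full; the proofs are below) =====
def Claim_equal_compress_indices_to_ranges_py : Prop := ∀ (idxs : List Int), Dom_compress_indices_to_ranges_py idxs → Pre_compress_indices_to_ranges_py idxs → Spec_compress_indices_to_ranges_py idxs (compress_indices_to_ranges_py idxs)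

-- ===== LEMMAS AND PROOFS =====

-- reference recursion: maximal consecutive runs of 'pv :: l' as (start, end) pairs, start forced to 'st'
def rangesRec (st pv : Int) : List Int → List (Int × Int)
  | [] => [(st, pv)]
  | i :: t => if i = pv + 1 then rangesRec st i t else (st, pv) :: rangesRec i i t

lemma foldA_eq_rangesRec (l : List Int) (r : List (Int × Int)) (st pv : Int) :
    (let a := l.foldl
        (fun (st : List (Int × Int) × Int × Int) i =>
          if i = st.2.2 + 1 then (st.1, st.2.1, i)
          else (st.1 ++ [(st.2.1, st.2.2)], i, i)) (r, st, pv);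
      a.1 ++ [(a.2.1, a.2.2)]) = r ++ rangesRec st pv l := by
  induction l generalizing r st pv with
  | nil => simp [rangesRec]
  | cons i t ih =>
    simp only [List.foldl_cons, rangesRec]
    by_cases h : i = pv + 1 <;> simp [h, ih, List.append_assoc]

lemma extendRun_congr (s t : List Int) (h : ∀ z : Int, z ∈ s ↔ z ∈ t) :
    ∀ (n : Nat) (b : Int), extendRun s b n = extendRun t b n := by
  intro n
  induction n with
  | zero => intro b; rfl
  | succ n ih => intro b; simp only [extendRun, h, ih]

lemma extendRun_eq (g : List Int) (pv : Int) :
    ∀ (fuel : Nat) (st : Int), st ≤ pv → (∀ k : Int, st ≤ k → k ≤ pv → k ∈ g) →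
      (pv + 1) ∉ g → (pv - st).toNat < fuel → extendRun g st fuel = pv := by
  intro fuel
  induction fuel with
  | zero => intro st _ _ _ hf; omega
  | succ n ih =>
    intro st hle hblock hstop hf
    by_cases he : st = pv
    · subst he
      simp only [extendRun, if_neg hstop]
    · have h1 : st + 1 ∈ g := hblock (st + 1) (by omega) (by omega)
      simp only [extendRun, if_pos h1]
      exact ih (st + 1) (by omega) (fun k hk1 hk2 => hblock k (by omega) hk2) hstop (by omega)

lemma fuel_big (g : List Int) (st pv : Int) (hle : st ≤ pv)
    (hblock : ∀ k : Int, st ≤ k → k ≤ pv → k ∈ g) : (pv - st).toNat < g.length := by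
  have hsub : PySem.List.pyRange st (pv + 1) 1 ⊆ g := by
    intro z hz
    rw [PySem.List.mem_pyRange_one] at hz
    exact hblock z hz.1 (by omega)
  have hnd := PySem.List.nodup_pyRange_one (a := st) (b := pv + 1)
  have := (List.subperm_of_subset hnd hsub).length_le
  rw [PySem.List.length_pyRange_one] at this
  omega

lemma mem_rest_of_gt (g u rest : List Int) (pv : Int) (hg : g.Pairwise (· < ·))
    (hsplit : g = u ++ pv :: rest) : ∀ z ∈ g, pv < z → z ∈ rest := by
  subst hsplit
  rw [List.pairwise_append] at hg
  intro z hz hgt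
  rcases List.mem_append.1 hz with h | h
  · exact absurd (hg.2.2 z h pv (by simp)) (by omega)
  · rcases List.mem_cons.1 h with h | h
    · omega
    · exact h

lemma not_mem_between (g u rest' : List Int) (pv i z : Int) (hg : g.Pairwise (· < ·))
    (hsplit : g = u ++ pv :: i :: rest') (h1 : pv < z) (h2 : z < i) : z ∉ g := by
  intro hz
  have hrest' : ∀ y ∈ rest', i < y := by
    have := hsplit ▸ hg
    rw [List.pairwise_append] at this
    exact (List.pairwise_cons.1 (List.pairwise_cons.1 this.2.1).2).1
  rcases List.mem_cons.1 (mem_rest_of_gt g u (i :: rest') pv hg hsplit z hz h1) with hm | hm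
  · omega
  · exact absurd (hrest' z hm) (by omega)

-- the heart: over a strictly sorted global list g, the runs that A's state machine emits
-- from the suffix pv :: rest are exactly B's (start, extended end) pairs
lemma runs_eq (g : List Int) (hg : g.Pairwise (· < ·)) :
    ∀ (rest u : List Int) (st pv : Int), g = u ++ pv :: rest → st ≤ pv →
      (∀ k : Int, st ≤ k → k ≤ pv → k ∈ g) → (st - 1) ∉ g →
      (st, extendRun g st g.length) ::
        ((rest.filter (fun a => decide ((a - 1) ∉ g))).map
          (fun a => (a, extendRun g a g.length)))
        = rangesRec st pv rest := by
  intro rest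
  induction rest with
  | nil =>
    intro u st pv hsplit hle hblock _
    have hstop : (pv + 1) ∉ g := fun h =>
      absurd (mem_rest_of_gt g u [] pv hg hsplit _ h (by omega)) (by simp)
    simp only [List.filter_nil, List.map_nil, rangesRec]
    rw [extendRun_eq g pv g.length st hle hblock hstop (fuel_big g st pv hle hblock)]
  | cons i rest' ih =>
    intro u st pv hsplit hle hblock hstart
    have hpi : pv < i := by
      have := hsplit ▸ hg
      rw [List.pairwise_append] at this
      exact (List.pairwise_cons.1 this.2.1).1 i (by simp)
    have hsplit' : g = (u ++ [pv]) ++ i :: rest' := by simp [hsplit]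
    have himem : i ∈ g := hsplit' ▸ (by simp)
    by_cases h : i = pv + 1
    · -- consecutive: i joins the current run; its predecessor pv is in g, so i is no start
      have hpmem : pv ∈ g := hblock pv hle le_rfl
      have hpfalse : ¬ ((i - 1) ∉ g) := by rw [h]; simp [hpmem]
      rw [rangesRec, if_pos h, List.filter_cons_of_neg (by simpa using hpfalse)]
      exact ih (u ++ [pv]) st i hsplit' (by omega)
        (fun k h1 h2 => by
          by_cases hk : k ≤ pv
          · exact hblock k h1 hk
          · have hki : k = i := by omega
            rw [hki]; exact himem)
        hstart
    · -- gap: the current run ends at pv, i starts a new one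
      have hgap : pv + 1 < i := by omega
      have hstop : (pv + 1) ∉ g :=
        not_mem_between g u rest' pv i (pv + 1) hg hsplit (by omega) hgap
      have histart : (i - 1) ∉ g :=
        not_mem_between g u rest' pv i (i - 1) hg hsplit (by omega) (by omega)
      rw [rangesRec, if_neg h, List.filter_cons_of_pos (by simpa using histart)]
      simp only [List.map_cons]
      rw [extendRun_eq g pv g.length st hle hblock hstop (fuel_big g st pv hle hblock)]
      refine congrArg _ ?_
      exact ih (u ++ [pv]) i i hsplit' le_rfl
        (fun k h1 h2 => by
          have hki : k = i := by omega
          rw [hki]; exact himem)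
        histart

-- ===== VERDICT (by name: the statement is the Claim_ definition above) =====
lemma pairwise_of_sorted_set (idxs : List Int) (x : Int) (rest : List Int)
    (ht : PySem.List.sorted (PySem.Set.ofList idxs) (fun x => x) false = x :: rest) :
    (x :: rest).Pairwise (· < ·) := by
  have := PySem.List.sorted_ofList_pairwise_lt (xs := idxs)
  rwa [ht] at this

theorem compress_indices_to_ranges_py_spec : Claim_equal_compress_indices_to_ranges_py := by
  intro idxs _ _
  unfold Spec_compress_indices_to_ranges_py compress_indices_to_ranges_py compress_indices_to_ranges_py_alt
  simp only []
  by_cases hnil : idxs = []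
  · subst hnil; rfl
  · rw [if_neg hnil]
    have hperm : (PySem.List.sorted (PySem.Set.ofList idxs) (fun x => x) false).Perm
        (PySem.Set.ofList idxs) := PySem.List.sorted_perm _ _ _
    cases ht : PySem.List.sorted (PySem.Set.ofList idxs) (fun x => x) false with
    | nil =>
      exfalso
      rw [PySem.List.sorted_eq_nil_iff] at ht
      cases idxs with
      | nil => exact hnil rfl
      | cons a l =>
        have ha : a ∈ PySem.Set.ofList (a :: l) := (PySem.Set.mem_ofList _ _).2 (by simp)
        rw [ht] at ha; simp at ha
    | cons x rest =>
      rw [ht] at hperm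
      have hg : (x :: rest).Pairwise (· < ·) := pairwise_of_sorted_set idxs x rest ht
      have hmem : ∀ z : Int, z ∈ PySem.Set.ofList idxs ↔ z ∈ x :: rest :=
        fun z => (hperm.mem_iff).symm
      -- B's filter predicate over the set equals the same predicate over the sorted list
      have hpred : (fun a : Int => decide ((a - 1) ∉ PySem.Set.ofList idxs))
          = (fun a : Int => decide ((a - 1) ∉ x :: rest)) := by
        funext a; exact decide_eq_decide.mpr (by rw [hmem])
      -- B's sorted run-start list is the filter of the sorted set
      have hsorted : PySem.List.sorted
            ((PySem.Set.ofList idxs).filter (fun a => decide ((a - 1) ∉ PySem.Set.ofList idxs)))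
            (fun x => x) false
          = (x :: rest).filter (fun a => decide ((a - 1) ∉ x :: rest)) := by
        rw [hpred]
        exact PySem.List.sorted_eq_of_perm_of_pairwise_lt _ _ _
          (hperm.filter _) (hg.filter _)
      -- B's extension probes only membership; fuel lengths agree up to the permutation
      have hE : ∀ a : Int,
          extendRun (PySem.Set.ofList idxs) a (PySem.Set.ofList idxs).length
            = extendRun (x :: rest) a (x :: rest).length := by
        intro a
        rw [← hperm.length_eq]
        exact extendRun_congr _ _ hmem _ a
      have hxstart : (x - 1) ∉ x :: rest := by
        have hlt := List.pairwise_cons.1 hg |>.1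
        intro hm
        rcases List.mem_cons.1 hm with hm | hm
        · omega
        · exact absurd (hlt _ hm) (by omega)
      have hruns := runs_eq (x :: rest) hg rest [] x x rfl le_rfl
        (fun k h1 h2 => by
          have hk : k = x := by omega
          rw [hk]; exact List.mem_cons_self)
        hxstart
      simp only []
      rw [hsorted, foldA_eq_rangesRec rest [] x x, List.nil_append, ← hruns,
        List.filter_cons_of_pos (by simpa using hxstart), List.map_cons, List.map_cons,
        List.map_map]
      simp only [Function.comp_def, hE]
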